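-- pv_equiv track=rewrite | github.com/Bilyant/Python-OOP | Basics/task-8.py | stars_rhombus
-- ===== SOURCE A (Python) =====
-- def stars_rhombus(size):
--     result = []
--     for i in range(1, size + 1):  # upper part
--         spaces = ' ' * (size - i)
--         stars = '*' * i
--         result.append(spaces + ' '.join(stars))
--     for i in range(size-1, 0, -1):  # bottom part
--         spaces = ' ' * (size - i)
--         stars = '*' * i
--         result.append(spaces + ' '.join(stars))
--
--     return '\n'.join(result)
-- ===== SOURCE B (Python) =====
-- def stars_rhombus(size):
--     rows = []
--     for n in range(1, 2 * size):
--         count = size - abs(size - n)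
--         rows.append(' ' * (size - count) + ' '.join('*' * count))
--     return '\n'.join(rows)
-- ===== Notes on version B (the rewrite author's own statement) =====
-- stated objective: simpler
-- what changed: Replaced A's two symmetric loops (upper and lower half) by one loop over all rhombus rows whose star count is the closed form size minus the distance of the row from the middle.
import Mathlib
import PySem

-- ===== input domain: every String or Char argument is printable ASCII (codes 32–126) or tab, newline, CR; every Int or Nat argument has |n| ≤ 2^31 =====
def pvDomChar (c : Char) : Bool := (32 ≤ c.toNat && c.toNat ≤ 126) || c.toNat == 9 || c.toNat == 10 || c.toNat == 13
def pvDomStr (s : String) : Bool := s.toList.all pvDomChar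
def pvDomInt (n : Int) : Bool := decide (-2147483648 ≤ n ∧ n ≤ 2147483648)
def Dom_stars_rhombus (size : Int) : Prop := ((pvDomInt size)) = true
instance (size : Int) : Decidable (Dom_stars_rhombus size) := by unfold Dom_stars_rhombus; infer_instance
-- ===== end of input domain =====

-- B replaces A's two symmetric row loops by one loop with a closed-form star count (objective: simpler).

-- shared row expression: ' ' * (size - i) + ' '.join('*' * i), as List Char
def pvStarsRow (size i : Int) : List Char :=
  PySem.List.pyRepeat [' '] (size - i) ++
    PySem.Chars.join [' '] ((PySem.List.pyRepeat ['*'] i).map (fun c => [c]))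

-- ===== PORT A =====
def stars_rhombus (size : Int) : String :=
  let upper := (PySem.List.pyRange 1 (size + 1) 1).map (pvStarsRow size)
  let lower := (PySem.List.pyRange (size - 1) 0 (-1)).map (pvStarsRow size)
  String.ofList (PySem.Chars.join ['\n'] (upper ++ lower))

-- ===== PORT B =====
def stars_rhombus_alt (size : Int) : String :=
  String.ofList (PySem.Chars.join ['\n']
    ((PySem.List.pyRange 1 (2 * size) 1).map (fun n => pvStarsRow size (size - |size - n|))))

-- ===== PRECONDITION & SPEC =====
def Spec_stars_rhombus (size : Int) (out : String) : Prop := out = stars_rhombus_alt size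
instance (size : Int) (out : String) : Decidable (Spec_stars_rhombus size out) := by unfold Spec_stars_rhombus; infer_instance

-- ===== CLAIM (what is proved, stated in full; the proofs are below) =====
def Claim_equal_stars_rhombus : Prop := ∀ (size : Int), Dom_stars_rhombus size → Spec_stars_rhombus size (stars_rhombus size)

-- ===== LEMMAS AND PROOFS =====
theorem pv_rows_eq (size : Int) :
    (PySem.List.pyRange 1 (2 * size) 1).map (fun n => pvStarsRow size (size - |size - n|)) =
      (PySem.List.pyRange 1 (size + 1) 1).map (pvStarsRow size) ++
        (PySem.List.pyRange (size - 1) 0 (-1)).map (pvStarsRow size) := by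
  by_cases h : size ≤ 0
  · rw [PySem.List.pyRange_one_eq_nil (by omega), PySem.List.pyRange_one_eq_nil (by omega),
      PySem.List.pyRange_neg_one_eq_nil (by omega)]
    simp
  · rw [not_le] at h
    rw [PySem.List.pyRange_one_append 1 (size + 1) (2 * size) (by omega) (by omega),
      List.map_append]
    congr 1
    · apply List.map_congr_left
      intro n hn
      rw [PySem.List.mem_pyRange_one] at hn
      have : size - |size - n| = n := by rw [abs_of_nonneg (by omega)]; omega
      rw [this]
    · rw [PySem.List.pyRange_one, PySem.List.pyRange_neg_one, List.map_map, List.map_map]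
      have hlen : (2 * size - (size + 1)).toNat = (size - 1 - 0).toNat := by omega
      rw [hlen]
      apply List.map_congr_left
      intro k hk
      rw [List.mem_range] at hk
      have hk' : (k : Int) ≤ size - 2 := by omega
      simp only [Function.comp]
      have : size - |size - (size + 1 + (k : Int))| = size - 1 - (k : Int) := by
        rw [abs_of_nonpos (by omega)]; omega
      rw [this]

-- ===== VERDICT (by name: the statement is the Claim_ definition above) =====
theorem stars_rhombus_spec : Claim_equal_stars_rhombus := by
  intro size _
  unfold Spec_stars_rhombus stars_rhombus stars_rhombus_alt
  rw [pv_rows_eq]
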